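-- pv_equiv track=rewrite | github.com/msc-27/AoC2024 | day07.py | obtainable
-- ===== SOURCE A (Python) =====
-- def obtainable(answers, numbers, part):
--     # Is any of the answers obtainable from the given numbers?
--     if len(numbers) == 1: return numbers[0] in answers
--     last = numbers[-1]
--     new_answers = []
--     for a in answers:
--         if a >= last:
--             new_answers.append(a - last)
--             if last and a % last == 0: new_answers.append(a // last)
--             if part == 2 and a > last:
--                 a_s = str(a)
--                 l_s = str(last)
--                 if a_s[-len(l_s):] == l_s:
--                     new_answers.append(int(a_s[:len(a_s) - len(l_s)]))
--     if new_answers: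
--         return obtainable(new_answers, numbers[:-1], part)
--     else:
--         return False
-- ===== SOURCE B (Python) =====
-- def obtainable(answers, numbers, part):
--     # Iterative instead of recursive: sweep numbers back-to-front keeping the set
--     # of still-reachable targets, deduplicating candidates at every level.
--     cands = set(answers)
--     for last in reversed(numbers[1:]):
--         nxt = set()
--         for a in cands:
--             if a >= last:
--                 nxt.add(a - last)
--                 if last and a % last == 0:
--                     nxt.add(a // last)
--                 if part == 2 and a > last:
--                     a_s = str(a)
--                     l_s = str(last)
--                     if a_s[-len(l_s):] == l_s:
--                         nxt.add(int(a_s[:len(a_s) - len(l_s)]))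
--         cands = nxt
--     return numbers[0] in cands
-- ===== Notes on version B (the rewrite author's own statement) =====
-- stated objective: faster
-- what changed: Replaces A's recursion that rebuilds a duplicate-laden candidate list at every level with an iterative back-to-front sweep that keeps the candidate targets in a set, deduplicating each level so overlapping branches collapse.
import Mathlib
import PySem

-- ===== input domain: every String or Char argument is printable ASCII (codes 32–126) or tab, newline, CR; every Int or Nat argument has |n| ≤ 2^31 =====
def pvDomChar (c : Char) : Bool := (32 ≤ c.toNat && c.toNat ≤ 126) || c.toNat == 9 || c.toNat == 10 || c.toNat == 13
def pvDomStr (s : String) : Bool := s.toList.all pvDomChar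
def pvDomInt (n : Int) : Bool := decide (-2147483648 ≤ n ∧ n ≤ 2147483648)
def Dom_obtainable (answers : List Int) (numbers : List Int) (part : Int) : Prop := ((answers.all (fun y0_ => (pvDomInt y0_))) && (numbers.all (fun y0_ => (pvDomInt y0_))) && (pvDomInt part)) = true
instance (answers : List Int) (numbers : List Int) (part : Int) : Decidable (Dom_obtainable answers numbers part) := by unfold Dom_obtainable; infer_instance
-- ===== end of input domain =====

-- B replaces A's recursion over duplicate-laden candidate lists by an iterative
-- back-to-front sweep over a deduplicated candidate set (measurably faster on
-- branching-heavy inputs); equivalence is proved for nonempty `numbers`.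


-- ===== PORT A =====
-- shared inner body of the `for a in …` loop of both Pythons: the candidates
-- generated from one answer `a` and the last number `last` (strings handled on
-- List Char via PySem.Int.toChars / PySem.List.slice — exact for str(int)).
-- `int(prefix)` is `(ofChars? …).getD 0`; the `none` case (int('') / int('-'))
-- is unreachable because the suffix test plus `a > last` forces a digit in the
-- prefix, so `.getD 0` is exact on every reachable input.
def genCands (part last a : Int) : List Int :=
  if a ≥ last then
    [a - last]
    ++ (if last ≠ 0 ∧ PySem.Int.mod a last = 0 then [PySem.Int.floordiv a last] else [])
    ++ (if part = 2 ∧ a > last then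
          let a_s := PySem.Int.toChars a
          let l_s := PySem.Int.toChars last
          if PySem.List.slice a_s (some (-(l_s.length : Int))) none = l_s then
            [(PySem.Int.ofChars? (PySem.List.slice a_s none
                (some ((a_s.length : Int) - (l_s.length : Int))))).getD 0]
          else []
        else [])
  else []

-- A's recursion on numbers[:-1]; the Nat fuel only makes the recursion
-- structural (fuel = numbers.length always suffices: each level drops one number).
def obtainableGo : Nat → List Int → List Int → Int → Bool
  | 0, _, _, _ => false   -- unreachable from obtainable: fuel = numbers.length ≥ 1 on Pre_
  | fuel + 1, answers, numbers, part =>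
    if numbers.length = 1 then
      answers.contains ((PySem.List.pyGet? numbers 0).getD 0)
    else
      match PySem.List.pyGet? numbers (-1) with
      | none => false   -- numbers = []: Python raises IndexError here; outside Pre_
      | some last =>
        let new_answers := answers.foldl (fun acc a => acc ++ genCands part last a) []
        if new_answers ≠ [] then
          obtainableGo fuel new_answers (PySem.List.slice numbers none (some (-1))) part
        else false

def obtainable (answers : List Int) (numbers : List Int) (part : Int) : Bool :=
  obtainableGo numbers.length answers numbers part

-- ===== PORT B =====
def obtainable_alt (answers : List Int) (numbers : List Int) (part : Int) : Bool :=
  let cands : PySem.Set Int := PySem.Set.ofList answers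
  let final := ((PySem.List.slice numbers (some 1) none).reverse).foldl
      (fun cands last =>
        cands.foldl (fun nxt a => (genCands part last a).foldl PySem.Set.add nxt)
          PySem.Set.empty)
      cands
  PySem.Set.contains final ((PySem.List.pyGet? numbers 0).getD 0)

-- ===== PRECONDITION & SPEC =====
-- Python A raises IndexError on numbers = [] (so does B); nothing else raises.
def Pre_obtainable (answers : List Int) (numbers : List Int) (part : Int) : Prop :=
  numbers ≠ []
instance (answers : List Int) (numbers : List Int) (part : Int) : Decidable (Pre_obtainable answers numbers part) := by unfold Pre_obtainable; infer_instance

def pvWitness_obtainable : List Int × List Int × Int := ([6, 9], [2, 3], 2)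

def Spec_obtainable (answers : List Int) (numbers : List Int) (part : Int) (out : Bool) : Prop := out = obtainable_alt answers numbers part
instance (answers : List Int) (numbers : List Int) (part : Int) (out : Bool) : Decidable (Spec_obtainable answers numbers part out) := by unfold Spec_obtainable; infer_instance

-- ===== CLAIM (what is proved, stated in full; the proofs are below) =====
def Claim_equal_obtainable : Prop := ∀ (answers : List Int) (numbers : List Int) (part : Int), Dom_obtainable answers numbers part → Pre_obtainable answers numbers part → Spec_obtainable answers numbers part (obtainable answers numbers part)

-- ===== LEMMAS AND PROOFS =====

-- one level of B's sweep
def stepB (part last : Int) (S : PySem.Set Int) : PySem.Set Int :=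
  S.foldl (fun nxt a => (genCands part last a).foldl PySem.Set.add nxt) PySem.Set.empty

lemma mem_foldl_add (l : List Int) (s : PySem.Set Int) (x : Int) :
    x ∈ l.foldl PySem.Set.add s ↔ x ∈ s ∨ x ∈ l := by
  have : l.foldl PySem.Set.add s = PySem.Set.update s l := rfl
  rw [this, PySem.Set.mem_update]

lemma mem_stepB (part last : Int) (S : PySem.Set Int) (x : Int) :
    x ∈ stepB part last S ↔ ∃ a ∈ S, x ∈ genCands part last a := by
  unfold stepB
  have key : ∀ (l : List Int) (init : PySem.Set Int),
      (x ∈ l.foldl (fun nxt a => (genCands part last a).foldl PySem.Set.add nxt) init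
        ↔ x ∈ init ∨ ∃ a ∈ l, x ∈ genCands part last a) := by
    intro l
    induction l with
    | nil => simp
    | cons a t ih =>
      intro init
      simp only [List.foldl_cons, ih, mem_foldl_add, List.mem_cons]
      constructor
      · rintro ((h | h) | ⟨b, hb, hx⟩)
        · exact Or.inl h
        · exact Or.inr ⟨a, Or.inl rfl, h⟩
        · exact Or.inr ⟨b, Or.inr hb, hx⟩
      · rintro (h | ⟨b, (rfl | hb), hx⟩)
        · exact Or.inl (Or.inl h)
        · exact Or.inl (Or.inr hx)
        · exact Or.inr ⟨b, hb, hx⟩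
  rw [key]
  simp [PySem.Set.empty]

lemma stepB_nil (part last : Int) : stepB part last [] = [] := rfl

lemma foldl_stepB_nil (part : Int) (rs : List Int) :
    rs.foldl (fun S last => stepB part last S) ([] : PySem.Set Int) = [] := by
  induction rs with
  | nil => rfl
  | cons r t ih => simpa [stepB_nil] using ih

-- the invariant: A's recursion equals B's remaining sweep whenever the
-- candidate set S has the same members as A's current answer list.
lemma main_inv (part : Int) : ∀ (n : Nat) (numbers answers : List Int) (S : PySem.Set Int),
    numbers.length ≤ n → numbers ≠ [] → (∀ x, x ∈ S ↔ x ∈ answers) →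
    obtainableGo n answers numbers part =
      PySem.Set.contains
        ((numbers.tail.reverse).foldl (fun S last => stepB part last S) S)
        ((PySem.List.pyGet? numbers 0).getD 0) := by
  intro n
  induction n with
  | zero =>
    intro numbers answers S hlb hne hS
    exact absurd (List.length_eq_zero_iff.mp (Nat.le_zero.mp hlb)) hne
  | succ n IH =>
    intro numbers answers S hlb hne hS
    rcases List.eq_nil_or_concat numbers with rfl | ⟨ys, last, rfl⟩
    · exact absurd rfl hne
    simp only [List.concat_eq_append] at hlb hne ⊢
    rcases ys with _ | ⟨y, ys'⟩
    · -- numbers = [last] : base case of A, empty sweep for B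
      simp only [List.nil_append] at hlb hne ⊢
      rw [obtainableGo]
      rw [if_pos (show [last].length = 1 from rfl)]
      simp only [List.tail_cons, List.reverse_nil, List.foldl_nil]
      have hx : (PySem.List.pyGet? [last] (0 : Int)).getD 0 = last := by
        simp [PySem.List.pyGet?, PySem.List.pyIdx?]
      rw [hx]
      by_cases hmem : last ∈ answers
      · simp [PySem.Set.contains, hmem, (hS last).2 hmem]
      · have : last ∉ S := fun h => hmem ((hS last).1 h)
        simp [PySem.Set.contains, hmem, this]
    · -- numbers = (y :: ys') ++ [last], length ≥ 2
      set ys : List Int := y :: ys' with hys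
      have hyne : ys ≠ [] := by simp [hys]
      have hlen : (ys ++ [last]).length ≠ 1 := by
        simp [hys, List.length_append]
      have hget : PySem.List.pyGet? (ys ++ [last]) (-1) = some last :=
        PySem.List.pyGet?_neg_one_append_singleton ys last
      rw [obtainableGo]
      rw [if_neg hlen, hget]
      have hslice : PySem.List.slice (ys ++ [last]) none (some (-1)) = ys := by
        rw [PySem.List.slice_to_neg_one, List.dropLast_concat]
      have htail : ((ys ++ [last]).tail.reverse) = last :: ys.tail.reverse := by
        simp [hys]
      have hpos : (0 : Int) ≤ (ys'.length : Int) + 1 := by positivity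
      have hget0 : (PySem.List.pyGet? (ys ++ [last]) 0).getD 0
          = (PySem.List.pyGet? ys 0).getD 0 := by
        simp [hys, PySem.List.pyGet?, PySem.List.pyIdx?, hpos]
      have hflat : answers.foldl (fun acc a => acc ++ genCands part last a) []
          = answers.flatMap (genCands part last) := by
        rw [PySem.List.foldl_append_eq_flatMap]; simp
      have hmem_new : ∀ x, x ∈ stepB part last S
          ↔ x ∈ answers.flatMap (genCands part last) := by
        intro x
        rw [List.mem_flatMap, mem_stepB]
        constructor
        · rintro ⟨a, ha, hx⟩; exact ⟨a, (hS a).1 ha, hx⟩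
        · rintro ⟨a, ha, hx⟩; exact ⟨a, (hS a).2 ha, hx⟩
      rw [htail, List.foldl_cons]
      show (if (answers.foldl (fun acc a => acc ++ genCands part last a) []) ≠ [] then
              obtainableGo n (answers.foldl (fun acc a => acc ++ genCands part last a) [])
                (PySem.List.slice (ys ++ [last]) none (some (-1))) part
            else false) = _
      rw [hflat, hslice]
      by_cases hempty : answers.flatMap (genCands part last) = []
      · -- A returns False without recursing; B's set is empty from here on
        rw [if_neg (not_not_intro hempty)]
        have hSnil : stepB part last S = [] := by
          cases h : stepB part last S with
          | nil => rfl
          | cons b t =>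
            exfalso
            have hb : b ∈ stepB part last S := by rw [h]; exact List.mem_cons_self
            rw [hmem_new b, hempty] at hb
            exact absurd hb (List.not_mem_nil)
        rw [hSnil, foldl_stepB_nil]
        simp [PySem.Set.contains]
      · rw [if_pos hempty, hget0]
        exact IH ys _ (stepB part last S)
          (by simp only [List.length_append, List.length_cons, List.length_nil] at hlb; omega)
          hyne hmem_new

-- ===== VERDICT (by name: the statement is the Claim_ definition above) =====
theorem obtainable_spec : Claim_equal_obtainable := by
  intro answers numbers part _ hpre
  unfold Spec_obtainable obtainable obtainable_alt
  have hslice1 : PySem.List.slice numbers (some 1) none = numbers.tail :=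
    PySem.List.slice_from_one numbers
  rw [hslice1]
  exact main_inv part numbers.length numbers answers (PySem.Set.ofList answers) le_rfl hpre
    (fun x => PySem.Set.mem_ofList answers x)
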